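-- pv_equiv track=rewrite | github.com/mpsanchis/programming_challenges | advent_of_code/2023/day7/lib2.py | transform_cards_with_joker
-- ===== SOURCE A (Python) =====
-- def cards2dict(cards):
--     cards_dict = {}
--     for c in cards:
--         if c in cards_dict:
--             cards_dict[c] += 1
--         else:
--             cards_dict[c] = 1
--
--     return cards_dict
--
-- def card2card_value(card):
--     return 13 - ['A', 'K', 'Q', 'T', '9', '8', '7', '6', '5', '4', '3', '2', 'J'].index(card)
--
-- def most_common_cards(cards, omit_joker):
--     card_dict = cards2dict(cards)
--     if omit_joker:
--         card_dict = {x:card_dict[x] for x in [k for k in card_dict.keys() if k!='J']}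
--
--     max_dupl = max(card_dict.values())
--
--     most_common_cards = []
--     for c in card_dict.keys():
--         if (card_dict[c] == max_dupl):
--             most_common_cards.append(c)
--
--     return most_common_cards
--
-- def highest_most_common_card(cards, omit_joker):
--     mcc = most_common_cards(cards, omit_joker)
--
--     return max(mcc, key=lambda c: card2card_value(c))
--
-- def transform_cards_with_joker(cards):
--     if (not 'J' in cards):
--         return cards
--
--     num_jokers = sum([c=='J' for c in cards])
--
--     if num_jokers == 5:
--         return 'AAAAA'
--
--     hmcc = highest_most_common_card(cards, omit_joker=True)
--
--     transformed_cards = ''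
--     for c in cards:
--         if c == 'J':
--             transformed_cards += hmcc
--         else:
--             transformed_cards += c
--
--     return transformed_cards
-- ===== SOURCE B (Python) =====
-- RANKS = 'AKQT98765432'  # recognised non-joker ranks, best first
--
-- def transform_cards_with_joker(cards):
--     if 'J' not in cards:
--         return cards
--
--     if cards.count('J') == 5:
--         return 'AAAAA'
--
--     # no per-hand counting structure: scan the fixed rank alphabet from best
--     # to worst, keeping the first rank whose multiplicity is strictly largest
--     best, best_count = None, 0
--     for r in RANKS:
--         n = cards.count(r)
--         if n > best_count:
--             best, best_count = r, n
--
--     return cards.replace('J', best)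
-- ===== Notes on version B (the rewrite author's own statement) =====
-- stated objective: alternative
-- what changed: Replaces A's per-hand dict pipeline (build a char dict, rebuild it filtering jokers, find the max multiplicity, collect the most-common list, max by card value, rebuild the string char by char) with a dict-free scan of the fixed 12-rank alphabet from best to worst keeping the first strict-greater count, then str.replace; correct because the highest-ranked maximum-count card is the first rank attaining the maximum in that order.
import Mathlib
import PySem

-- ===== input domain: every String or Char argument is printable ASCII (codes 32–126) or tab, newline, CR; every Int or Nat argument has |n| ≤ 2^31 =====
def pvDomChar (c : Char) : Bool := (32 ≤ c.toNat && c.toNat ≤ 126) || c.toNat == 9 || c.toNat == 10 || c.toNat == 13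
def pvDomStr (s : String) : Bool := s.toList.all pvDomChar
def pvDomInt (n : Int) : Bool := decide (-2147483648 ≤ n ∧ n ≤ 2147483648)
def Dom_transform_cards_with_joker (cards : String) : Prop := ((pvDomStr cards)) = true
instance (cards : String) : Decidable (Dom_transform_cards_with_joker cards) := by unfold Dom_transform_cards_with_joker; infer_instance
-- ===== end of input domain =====

-- B drops A's per-hand dict pipeline entirely: it scans the fixed 12-rank alphabet from
-- best to worst keeping the first strict-greater count and rebuilds with str.replace;
-- objective: alternative (dict-free) algorithm of the same cost.

-- ===== PORT A =====
def cards2dict (cards : String) : PySem.Dict Char Int :=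
  cards.toList.foldl
    (fun d c => if d.contains c then d.modify c 0 (· + 1) else d.insert c 1)
    PySem.Dict.empty

-- list.index raises ValueError when the card is absent; the .getD 0 is unreachable under Pre_
def card2card_value (card : Char) : Int :=
  13 - (((PySem.List.index? ['A', 'K', 'Q', 'T', '9', '8', '7', '6', '5', '4', '3', '2', 'J'] card).getD 0 : Nat) : Int)

def most_common_cards (cards : String) (omit_joker : Bool) : List Char :=
  let card_dict := cards2dict cards
  let card_dict := if omit_joker then
      PySem.Dict.ofList ((card_dict.keys.filter (fun k => k != 'J')).map (fun x => (x, card_dict.getD x 0)))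
    else card_dict
  -- max() of an empty dict raises ValueError; the .getD 0 is unreachable under Pre_
  let max_dupl := (PySem.List.max? card_dict.values (fun v => v)).getD 0
  card_dict.keys.foldl (fun acc c => if card_dict.getD c 0 == max_dupl then acc ++ [c] else acc) []

-- max() of an empty list raises ValueError; the .getD 'A' is unreachable under Pre_
def highest_most_common_card (cards : String) (omit_joker : Bool) : Char :=
  (PySem.List.max? (most_common_cards cards omit_joker) (fun c => card2card_value c)).getD 'A'

def transform_cards_with_joker (cards : String) : String :=
  if !(PySem.Str.isIn "J" cards) then cards
  else
    let num_jokers : Int := (cards.toList.map (fun c => if c == 'J' then (1 : Int) else 0)).sum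
    if num_jokers == 5 then "AAAAA"
    else
      let hmcc := highest_most_common_card cards true
      String.ofList (cards.toList.foldl (fun acc c => acc ++ [if c == 'J' then hmcc else c]) [])

-- ===== PORT B =====
def pvRANKS : List Char := ['A', 'K', 'Q', 'T', '9', '8', '7', '6', '5', '4', '3', '2']

def transform_cards_with_joker_alt (cards : String) : String :=
  if !(PySem.Str.isIn "J" cards) then cards
  else if PySem.Str.count cards "J" == 5 then "AAAAA"
  else
    let st := pvRANKS.foldl
      (fun (s : Option Char × Int) r =>
        let n : Int := (PySem.Str.count cards (String.ofList [r]) : Int)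
        if n > s.2 then (some r, n) else s)
      ((none : Option Char), (0 : Int))
    -- str.replace with best = None raises TypeError; the .getD 'A' is unreachable under Pre_
    PySem.Str.replace cards "J" (String.ofList [st.1.getD 'A'])

-- ===== PRECONDITION & SPEC =====
-- Pre_ excludes exactly the inputs on which A raises ValueError: hands containing 'J'
-- whose joker count is not 5 and which either have no non-joker card at all (max() of an
-- empty dict) or have a maximal-count non-joker card outside the 13 recognised ranks
-- (list.index fails).  On every excluded input A raises, so nothing A returns on is lost.
def Pre_transform_cards_with_joker (cards : String) : Prop :=
  'J' ∉ cards.toList ∨ cards.toList.count 'J' = 5 ∨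
    ((∃ c ∈ cards.toList, c ≠ 'J') ∧
     ∀ c ∈ cards.toList, c = 'J' ∨
       (∃ d ∈ cards.toList, d ≠ 'J' ∧ cards.toList.count c < cards.toList.count d) ∨
       c ∈ ['A', 'K', 'Q', 'T', '9', '8', '7', '6', '5', '4', '3', '2'])
-- Bool mirror of Pre_ so that `decide` evaluates cheaply
def pvPreBool (cards : String) : Bool :=
  !(cards.toList.contains 'J') || cards.toList.count 'J' == 5 ||
    (cards.toList.any (fun c => c != 'J') &&
     cards.toList.all (fun c => c == 'J' ||
       cards.toList.any (fun d => d != 'J' && decide (cards.toList.count c < cards.toList.count d)) ||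
       (['A', 'K', 'Q', 'T', '9', '8', '7', '6', '5', '4', '3', '2'] : List Char).contains c))

instance (cards : String) : Decidable (Pre_transform_cards_with_joker cards) :=
  decidable_of_iff (pvPreBool cards = true) (by
    unfold pvPreBool Pre_transform_cards_with_joker
    simp only [Bool.or_eq_true, Bool.and_eq_true, Bool.not_eq_true', List.contains_eq_mem,
      decide_eq_false_iff_not, decide_eq_true_eq, List.any_eq_true, List.all_eq_true,
      bne_iff_ne, beq_iff_eq]
    simp [or_assoc])

def pvWitness_transform_cards_with_joker : String := "QJJQ2"

def Spec_transform_cards_with_joker (cards : String) (out : String) : Prop :=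
  out = transform_cards_with_joker_alt cards
instance (cards : String) (out : String) : Decidable (Spec_transform_cards_with_joker cards out) := by
  unfold Spec_transform_cards_with_joker; infer_instance

-- ===== CLAIM (what is proved, stated in full; the proofs are below) =====
def Claim_equal_transform_cards_with_joker : Prop :=
  ∀ (cards : String), Dom_transform_cards_with_joker cards →
    Pre_transform_cards_with_joker cards →
    Spec_transform_cards_with_joker cards (transform_cards_with_joker cards)

-- ===== LEMMAS AND PROOFS =====

lemma singleton_infix_iff_mem (x : Char) (l : List Char) : [x] <:+: l ↔ x ∈ l := by
  constructor
  · intro h; exact h.mem (List.mem_singleton_self x)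
  · intro h
    obtain ⟨s, t, rfl⟩ := List.append_of_mem h
    exact ⟨s, t, by simp⟩

lemma isIn_J_iff (cards : String) : PySem.Str.isIn "J" cards = true ↔ 'J' ∈ cards.toList := by
  rw [PySem.Str.isIn_iff_infix]
  exact singleton_infix_iff_mem 'J' cards.toList

-- s.count(c) for a single character c is the character count
lemma count_go_singleton (c : Char) (l : List Char) (fuel acc : Nat) (h : l.length ≤ fuel) :
    PySem.Chars.count.go [c] fuel l acc = acc + l.count c := by
  induction l generalizing fuel acc with
  | nil => cases fuel <;> simp [PySem.Chars.count.go]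
  | cons x t ih =>
    cases fuel with
    | zero => simp at h
    | succ f =>
      simp only [List.length_cons, Nat.succ_le_succ_iff] at h
      by_cases hx : c = x
      · subst hx
        have hgo : PySem.Chars.count.go [c] (f + 1) (c :: t) acc
            = PySem.Chars.count.go [c] f t (acc + 1) := by
          simp [PySem.Chars.count.go, List.isPrefixOf]
        rw [hgo, ih f (acc + 1) h, List.count_cons]
        simp; omega
      · have hpre : ([c].isPrefixOf (x :: t)) = false := by
          simp only [List.isPrefixOf, Bool.and_eq_false_iff]
          left
          exact beq_false_of_ne (fun hh => hx hh)
        have hgo : PySem.Chars.count.go [c] (f + 1) (x :: t) acc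
            = PySem.Chars.count.go [c] f t acc := by
          simp [PySem.Chars.count.go, hpre]
        rw [hgo, ih f acc h, List.count_cons]
        simp [beq_false_of_ne (fun hh => hx hh.symm)]

lemma chars_count_singleton (c : Char) (l : List Char) :
    PySem.Chars.count l [c] = l.count c := by
  simpa [PySem.Chars.count] using count_go_singleton c l l.length 0 le_rfl

lemma str_count_char (cards : String) (c : Char) :
    PySem.Str.count cards (String.ofList [c]) = cards.toList.count c := by
  have : (String.ofList [c]).toList = [c] := by simp
  rw [PySem.Str.count, this, chars_count_singleton]

-- s.replace(j, b) for single characters is a character map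
lemma replace_go_single (j b : Char) (l : List Char) (fuel : Nat) (acc : List Char)
    (h : l.length ≤ fuel) :
    PySem.Chars.replace.go [j] [b] fuel l acc
      = acc.reverse ++ l.map (fun c => if c = j then b else c) := by
  induction l generalizing fuel acc with
  | nil => cases fuel <;> simp [PySem.Chars.replace.go]
  | cons x t ih =>
    cases fuel with
    | zero => simp at h
    | succ f =>
      simp only [List.length_cons, Nat.succ_le_succ_iff] at h
      by_cases hx : j = x
      · subst hx
        have hgo : PySem.Chars.replace.go [j] [b] (f + 1) (j :: t) acc
            = PySem.Chars.replace.go [j] [b] f t (b :: acc) := by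
          simp [PySem.Chars.replace.go, List.isPrefixOf]
        rw [hgo, ih f (b :: acc) h]
        simp
      · have hpre : ([j].isPrefixOf (x :: t)) = false := by
          simp only [List.isPrefixOf, Bool.and_eq_false_iff]
          left
          exact beq_false_of_ne hx
        have hgo : PySem.Chars.replace.go [j] [b] (f + 1) (x :: t) acc
            = PySem.Chars.replace.go [j] [b] f t (x :: acc) := by
          simp [PySem.Chars.replace.go, hpre]
        rw [hgo, ih f (x :: acc) h]
        simp [Ne.symm hx]

lemma chars_replace_single (j b : Char) (l : List Char) :
    PySem.Chars.replace l [j] [b] = l.map (fun c => if c = j then b else c) := by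
  rw [PySem.Chars.replace]
  simp only [List.isEmpty_cons, Bool.false_eq_true, if_false]
  simpa using replace_go_single j b l l.length [] le_rfl

-- A's first counting loop is collections.Counter
lemma cards2dict_eq_counter (cards : String) :
    cards2dict cards = PySem.Dict.counter cards.toList := by
  rw [PySem.Dict.counter_eq_foldl]
  unfold cards2dict
  congr 1
  funext d c
  by_cases h : d.contains c
  · simp [h, PySem.Dict.modify]
  · have hf : d.contains c = false := by simpa using h
    have h0 : d.getD c 0 = 0 := by
      apply PySem.Dict.getD_of_not_contains
      exact hf
    simp [hf, PySem.Dict.modify, h0]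

-- a dict literal with pairwise distinct keys keeps exactly its pair list
lemma items_ofList_nodup (pairs : List (Char × Int)) (h : (pairs.map Prod.fst).Nodup) :
    (PySem.Dict.ofList pairs).items = pairs := by
  unfold PySem.Dict.ofList PySem.Dict.update
  have := PySem.Dict.items_foldl_insert_fresh pairs Prod.fst Prod.snd PySem.Dict.empty
    (fun a _ => by simp) h
  simpa using this

-- card2card_value is injective on the 12 recognised ranks
lemma rank_value_inj_bool : (pvRANKS.all (fun a => pvRANKS.all (fun b =>
    (card2card_value a != card2card_value b) || a == b))) = true := by decide

lemma rank_value_inj :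
    ∀ a ∈ pvRANKS, ∀ b ∈ pvRANKS, card2card_value a = card2card_value b → a = b := by
  intro a ha b hb hv
  have h := rank_value_inj_bool
  rw [List.all_eq_true] at h
  have h' := h a ha
  rw [List.all_eq_true] at h'
  have h'' := h' b hb
  simp only [Bool.or_eq_true, bne_iff_ne, beq_iff_eq] at h''
  rcases h'' with hc | hc
  · exact absurd hv hc
  · exact hc

-- pvRANKS is listed in strictly decreasing card value
set_option maxRecDepth 8000 in
lemma rank_sorted :
    List.Pairwise (fun a b => card2card_value b < card2card_value a) pvRANKS := by decide

lemma J_not_rank : 'J' ∉ pvRANKS := by decide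

-- B's strict-greater scan over a value-sorted alphabet: invariant of the fold
lemma fold_argmax (cnt : Char → Int) :
    ∀ (rs : List Char) (s0 : Option Char × Int),
    List.Pairwise (fun a b => card2card_value b < card2card_value a) rs →
    (rs.foldl (fun s r => if cnt r > s.2 then (some r, cnt r) else s) s0 = s0 ∧
        ∀ r ∈ rs, cnt r ≤ s0.2) ∨
    (∃ w ∈ rs,
        rs.foldl (fun s r => if cnt r > s.2 then (some r, cnt r) else s) s0 = (some w, cnt w) ∧
        s0.2 < cnt w ∧ (∀ r ∈ rs, cnt r ≤ cnt w) ∧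
        (∀ r ∈ rs, cnt r = cnt w → card2card_value r ≤ card2card_value w)) := by
  intro rs
  induction rs with
  | nil => intro s0 _; left; exact ⟨rfl, by simp⟩
  | cons r t ih =>
    intro s0 hp
    have hpt := hp.of_cons
    have hlt : ∀ y ∈ t, card2card_value y < card2card_value r :=
      fun y hy => List.rel_of_pairwise_cons hp hy
    by_cases hc : cnt r > s0.2
    · have hstep : (r :: t).foldl (fun s r => if cnt r > s.2 then (some r, cnt r) else s) s0
          = t.foldl (fun s r => if cnt r > s.2 then (some r, cnt r) else s) (some r, cnt r) := by
        simp [List.foldl_cons, hc]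
      rcases ih (some r, cnt r) hpt with ⟨heq, hall⟩ | ⟨w, hw, heq, hgt, hmax, htie⟩
      · right
        refine ⟨r, List.mem_cons_self, ?_, hc, ?_, ?_⟩
        · rw [hstep, heq]
        · intro y hy
          rcases List.mem_cons.mp hy with rfl | hy
          · exact le_rfl
          · exact hall y hy
        · intro y hy _
          rcases List.mem_cons.mp hy with rfl | hy
          · exact le_rfl
          · exact le_of_lt (hlt y hy)
      · right
        refine ⟨w, List.mem_cons_of_mem r hw, ?_, by omega, ?_, ?_⟩
        · rw [hstep, heq]
        · intro y hy
          rcases List.mem_cons.mp hy with rfl | hy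
          · omega
          · exact hmax y hy
        · intro y hy hcy
          rcases List.mem_cons.mp hy with rfl | hy
          · omega
          · exact htie y hy hcy
    · have hstep : (r :: t).foldl (fun s r => if cnt r > s.2 then (some r, cnt r) else s) s0
          = t.foldl (fun s r => if cnt r > s.2 then (some r, cnt r) else s) s0 := by
        simp [List.foldl_cons, hc]
      rcases ih s0 hpt with ⟨heq, hall⟩ | ⟨w, hw, heq, hgt, hmax, htie⟩
      · left
        refine ⟨hstep.trans heq, ?_⟩
        intro y hy
        rcases List.mem_cons.mp hy with rfl | hy
        · omega
        · exact hall y hy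
      · right
        refine ⟨w, List.mem_cons_of_mem r hw, hstep.trans heq, hgt, ?_, ?_⟩
        · intro y hy
          rcases List.mem_cons.mp hy with rfl | hy
          · omega
          · exact hmax y hy
        · intro y hy hcy
          rcases List.mem_cons.mp hy with rfl | hy
          · omega
          · exact htie y hy hcy

-- the heart: A's two-stage argmax equals the winner of B's alphabet scan
lemma hmcc_eq_best (cards : String)
    (hex : ∃ c ∈ cards.toList, c ≠ 'J')
    (hvalid : ∀ c ∈ cards.toList, c = 'J' ∨
       (∃ d ∈ cards.toList, d ≠ 'J' ∧ cards.toList.count c < cards.toList.count d) ∨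
       c ∈ ['A', 'K', 'Q', 'T', '9', '8', '7', '6', '5', '4', '3', '2']) :
    highest_most_common_card cards true =
      (pvRANKS.foldl
        (fun (s : Option Char × Int) r =>
          if ((cards.toList.count r : Int)) > s.2 then (some r, (cards.toList.count r : Int)) else s)
        ((none : Option Char), (0 : Int))).1.getD 'A' := by
  obtain ⟨c0, hc0L, hc0⟩ := hex
  -- ===== A side: unfold and normalise over Set/count =====
  unfold highest_most_common_card most_common_cards
  simp only [cards2dict_eq_counter, if_true, PySem.Dict.keys_counter, PySem.Dict.getD_counter]
  have hKAnd : ((PySem.Set.ofList cards.toList).filter (fun k => k != 'J')).Nodup :=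
    (PySem.Set.nodup_ofList cards.toList).filter _
  have hKAmem : ∀ c, c ∈ (PySem.Set.ofList cards.toList).filter (fun k => k != 'J')
      ↔ (c ∈ cards.toList ∧ c ≠ 'J') := by
    intro c
    rw [List.mem_filter, PySem.Set.mem_ofList]
    simp [bne_iff_ne]
  have hitems : (PySem.Dict.ofList (((PySem.Set.ofList cards.toList).filter (fun k => k != 'J')).map
        (fun x => (x, (cards.toList.count x : Int))))).items
      = ((PySem.Set.ofList cards.toList).filter (fun k => k != 'J')).map
        (fun x => (x, (cards.toList.count x : Int))) := by
    apply items_ofList_nodup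
    rw [List.map_map]
    simpa [Function.comp_def] using hKAnd
  have hkeys : (PySem.Dict.ofList (((PySem.Set.ofList cards.toList).filter (fun k => k != 'J')).map
        (fun x => (x, (cards.toList.count x : Int))))).keys
      = (PySem.Set.ofList cards.toList).filter (fun k => k != 'J') := by
    simp only [PySem.Dict.keys, hitems, List.map_map]
    simp [Function.comp_def]
  have hvalues : (PySem.Dict.ofList (((PySem.Set.ofList cards.toList).filter (fun k => k != 'J')).map
        (fun x => (x, (cards.toList.count x : Int))))).values
      = ((PySem.Set.ofList cards.toList).filter (fun k => k != 'J')).map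
        (fun x => (cards.toList.count x : Int)) := by
    simp only [PySem.Dict.values, hitems, List.map_map]
    simp [Function.comp_def]
  have hgetD : ∀ c ∈ (PySem.Set.ofList cards.toList).filter (fun k => k != 'J'),
      (PySem.Dict.ofList (((PySem.Set.ofList cards.toList).filter (fun k => k != 'J')).map
        (fun x => (x, (cards.toList.count x : Int))))).getD c 0
      = (cards.toList.count c : Int) := by
    intro c hc
    apply PySem.Dict.getD_of_mem_items
    · rw [hitems]
      exact List.mem_map_of_mem hc
    · rw [hkeys]
      exact hKAnd
  have hc0KA : c0 ∈ (PySem.Set.ofList cards.toList).filter (fun k => k != 'J') :=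
    (hKAmem c0).2 ⟨hc0L, hc0⟩
  rw [hkeys]
  generalize hmd : (PySem.List.max?
      (PySem.Dict.ofList (((PySem.Set.ofList cards.toList).filter (fun k => k != 'J')).map
        (fun x => (x, (cards.toList.count x : Int))))).values (fun v => v)).getD 0 = md
  obtain ⟨M, hM⟩ : ∃ M, PySem.List.max?
      (PySem.Dict.ofList (((PySem.Set.ofList cards.toList).filter (fun k => k != 'J')).map
        (fun x => (x, (cards.toList.count x : Int))))).values (fun v => v) = some M := by
    cases hm : PySem.List.max?
        (PySem.Dict.ofList (((PySem.Set.ofList cards.toList).filter (fun k => k != 'J')).map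
          (fun x => (x, (cards.toList.count x : Int))))).values (fun v => v) with
    | none =>
      rw [PySem.List.max?_eq_none_iff, hvalues, List.map_eq_nil_iff] at hm
      rw [hm] at hc0KA
      exact absurd hc0KA List.not_mem_nil
    | some M => exact ⟨M, rfl⟩
  have hmdM : md = M := by rw [← hmd, hM]; rfl
  subst hmdM
  have hMmax : ∀ y ∈ (PySem.Set.ofList cards.toList).filter (fun k => k != 'J'),
      (cards.toList.count y : Int) ≤ md := by
    intro y hy
    have hmem : (cards.toList.count y : Int) ∈ (PySem.Dict.ofList
        (((PySem.Set.ofList cards.toList).filter (fun k => k != 'J')).map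
          (fun x => (x, (cards.toList.count x : Int))))).values := by
      rw [hvalues]; exact List.mem_map_of_mem hy
    simpa using PySem.List.max?_isMax hM _ hmem
  obtain ⟨x1, hx1KA, hx1M⟩ : ∃ x1 ∈ (PySem.Set.ofList cards.toList).filter (fun k => k != 'J'),
      (cards.toList.count x1 : Int) = md := by
    have := PySem.List.max?_mem hM
    rw [hvalues] at this
    obtain ⟨x1, hx1, hx1e⟩ := List.mem_map.1 this
    exact ⟨x1, hx1, hx1e⟩
  have hmcceq : (((PySem.Set.ofList cards.toList).filter (fun k => k != 'J')).foldl
      (fun acc c => if (PySem.Dict.ofList (((PySem.Set.ofList cards.toList).filter (fun k => k != 'J')).map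
        (fun x => (x, (cards.toList.count x : Int))))).getD c 0 == md then acc ++ [c] else acc) [])
      = ((PySem.Set.ofList cards.toList).filter (fun k => k != 'J')).filter
          (fun c => (cards.toList.count c : Int) == md) := by
    have hfold := PySem.List.foldl_append_if
      (fun c => (PySem.Dict.ofList (((PySem.Set.ofList cards.toList).filter (fun k => k != 'J')).map
        (fun x => (x, (cards.toList.count x : Int))))).getD c 0 == md)
      (fun c => c) ((PySem.Set.ofList cards.toList).filter (fun k => k != 'J')) []
    rw [hfold]
    simp only [List.nil_append, List.map_id']
    apply List.filter_congr
    intro c hc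
    rw [hgetD c hc]
  rw [hmcceq]
  have hmccmem : ∀ c, c ∈ ((PySem.Set.ofList cards.toList).filter (fun k => k != 'J')).filter
      (fun c => (cards.toList.count c : Int) == md)
      ↔ ((c ∈ cards.toList ∧ c ≠ 'J') ∧ (cards.toList.count c : Int) = md) := by
    intro c
    rw [List.mem_filter, hKAmem c]
    simp
  obtain ⟨a, ha⟩ : ∃ a, PySem.List.max?
      (((PySem.Set.ofList cards.toList).filter (fun k => k != 'J')).filter
        (fun c => (cards.toList.count c : Int) == md))
      (fun c => card2card_value c) = some a := by
    cases hm : PySem.List.max?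
        (((PySem.Set.ofList cards.toList).filter (fun k => k != 'J')).filter
          (fun c => (cards.toList.count c : Int) == md))
        (fun c => card2card_value c) with
    | none =>
      rw [PySem.List.max?_eq_none_iff] at hm
      have := (hmccmem x1).2 ⟨(hKAmem x1).1 hx1KA, hx1M⟩
      rw [hm] at this
      exact absurd this List.not_mem_nil
    | some a => exact ⟨a, rfl⟩
  obtain ⟨⟨haL, haJ⟩, haM⟩ := (hmccmem a).1 (PySem.List.max?_mem ha)
  have haVal : ∀ y, y ∈ cards.toList → y ≠ 'J' → (cards.toList.count y : Int) = md →
      card2card_value y ≤ card2card_value a := by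
    intro y hyL hyJ hyM
    exact PySem.List.max?_isMax ha y ((hmccmem y).2 ⟨⟨hyL, hyJ⟩, hyM⟩)
  -- every maximum-count non-joker card is a recognised rank
  have hmaxR : ∀ c, c ∈ cards.toList → c ≠ 'J' → (cards.toList.count c : Int) = md →
      c ∈ pvRANKS := by
    intro c hcL hcJ hcM
    rcases hvalid c hcL with hc | ⟨d, hdL, hdJ, hdgt⟩ | hc
    · exact absurd hc hcJ
    · exfalso
      have h1 : (cards.toList.count d : Int) ≤ md := hMmax d ((hKAmem d).2 ⟨hdL, hdJ⟩)
      have h2 : (cards.toList.count c : Int) < (cards.toList.count d : Int) := by exact_mod_cast hdgt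
      omega
    · exact hc
  -- ===== B side: the scan's winner =====
  rcases fold_argmax (fun r => (cards.toList.count r : Int)) pvRANKS ((none : Option Char), (0 : Int))
      rank_sorted with ⟨_, hall⟩ | ⟨w, hwR, heq, _, hwmax, hwtie⟩
  · exfalso
    have hx1R : x1 ∈ pvRANKS :=
      hmaxR x1 ((hKAmem x1).1 hx1KA).1 ((hKAmem x1).1 hx1KA).2 hx1M
    have h1 : (cards.toList.count x1 : Int) ≤ 0 := hall x1 hx1R
    have h2 : 0 < cards.toList.count x1 := List.count_pos_iff.2 ((hKAmem x1).1 hx1KA).1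
    omega
  · -- the winner w has the global max count md
    have hx1R : x1 ∈ pvRANKS :=
      hmaxR x1 ((hKAmem x1).1 hx1KA).1 ((hKAmem x1).1 hx1KA).2 hx1M
    have hwge : md ≤ (cards.toList.count w : Int) := hx1M ▸ hwmax x1 hx1R
    have hwpos : 0 < cards.toList.count w := by
      have h2 : 0 < cards.toList.count x1 := List.count_pos_iff.2 ((hKAmem x1).1 hx1KA).1
      have h3 : ((cards.toList.count x1 : Int)) ≤ ((cards.toList.count w : Int)) := hwmax x1 hx1R
      omega
    have hwL : w ∈ cards.toList := List.count_pos_iff.1 hwpos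
    have hwJ : w ≠ 'J' := fun h => J_not_rank (h ▸ hwR)
    have hwle : (cards.toList.count w : Int) ≤ md := hMmax w ((hKAmem w).2 ⟨hwL, hwJ⟩)
    have hwM : (cards.toList.count w : Int) = md := le_antisymm hwle hwge
    -- a and w coincide
    have haR : a ∈ pvRANKS := hmaxR a haL haJ haM
    have h1 : card2card_value w ≤ card2card_value a := haVal w hwL hwJ hwM
    have h2 : card2card_value a ≤ card2card_value w := hwtie a haR (by omega)
    have hab : a = w := rank_value_inj a haR w hwR (le_antisymm h2 h1)
    rw [ha, heq]
    simp [hab]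

set_option maxHeartbeats 1000000 in
lemma transform_eq (cards : String) (h : Pre_transform_cards_with_joker cards) :
    transform_cards_with_joker cards = transform_cards_with_joker_alt cards := by
  have hshow : transform_cards_with_joker cards =
      (if !(PySem.Str.isIn "J" cards) then cards
       else if ((cards.toList.map (fun c => if c == 'J' then (1 : Int) else 0)).sum == 5) then "AAAAA"
       else String.ofList (cards.toList.foldl
         (fun acc c => acc ++ [if c == 'J' then highest_most_common_card cards true else c]) [])) := rfl
  have hshow' : transform_cards_with_joker_alt cards =
      (if !(PySem.Str.isIn "J" cards) then cards
       else if (PySem.Str.count cards "J" == 5) then "AAAAA"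
       else PySem.Str.replace cards "J" (String.ofList
         [(pvRANKS.foldl
            (fun (s : Option Char × Int) r =>
              if ((PySem.Str.count cards (String.ofList [r]) : Int)) > s.2
              then (some r, (PySem.Str.count cards (String.ofList [r]) : Int)) else s)
            ((none : Option Char), (0 : Int))).1.getD 'A'])) := rfl
  rw [hshow, hshow']
  by_cases hJ : 'J' ∈ cards.toList
  · have hin : PySem.Str.isIn "J" cards = true := (isIn_J_iff cards).2 hJ
    have hJl : ("J" : String).toList = ['J'] := rfl
    have hsum : (cards.toList.map (fun c => if c == 'J' then (1 : Int) else 0)).sum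
        = (cards.toList.count 'J' : Int) := by
      rw [PySem.List.sum_map_ite_one_zero]
      norm_num [List.count_eq_countP]
    have hcnt : PySem.Str.count cards "J" = cards.toList.count 'J' := by
      rw [PySem.Str.count, hJl, chars_count_singleton]
    rw [hin]
    by_cases h5 : cards.toList.count 'J' = 5
    · have hA5 : ((cards.toList.map (fun c => if c == 'J' then (1 : Int) else 0)).sum == 5) = true := by
        rw [hsum, h5]; rfl
      have hB5 : (PySem.Str.count cards "J" == 5) = true := by
        rw [hcnt, h5]; rfl
      rw [hA5, hB5]
      simp
    · have hg1 : ((cards.toList.map (fun c => if c == 'J' then (1 : Int) else 0)).sum == 5) = false := by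
        rw [hsum]
        simp only [beq_eq_false_iff_ne, ne_eq]
        intro hc
        exact h5 (by exact_mod_cast hc)
      have hg2 : (PySem.Str.count cards "J" == 5) = false := by
        rw [hcnt]
        simp [h5]
      rw [hg1, hg2]
      simp only [Bool.not_true, Bool.false_eq_true, if_false]
      have hpre : (∃ c ∈ cards.toList, c ≠ 'J') ∧
          ∀ c ∈ cards.toList, c = 'J' ∨
            (∃ d ∈ cards.toList, d ≠ 'J' ∧ cards.toList.count c < cards.toList.count d) ∨
            c ∈ ['A', 'K', 'Q', 'T', '9', '8', '7', '6', '5', '4', '3', '2'] := by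
        rcases h with h1 | h2 | h3
        · exact absurd hJ h1
        · exact absurd h2 h5
        · exact h3
      -- rewrite B's per-rank counts to character counts, then plug in the argmax lemma
      have hcnteq : ∀ s : Option Char × Int, ∀ r : Char,
          (if ((PySem.Str.count cards (String.ofList [r]) : Int)) > s.2
           then (some r, (PySem.Str.count cards (String.ofList [r]) : Int)) else s)
          = (if ((cards.toList.count r : Int)) > s.2 then (some r, (cards.toList.count r : Int)) else s) := by
        intro s r
        rw [str_count_char]
      have hfoldeq : (pvRANKS.foldl
            (fun (s : Option Char × Int) r =>
              if ((PySem.Str.count cards (String.ofList [r]) : Int)) > s.2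
              then (some r, (PySem.Str.count cards (String.ofList [r]) : Int)) else s)
            ((none : Option Char), (0 : Int)))
          = (pvRANKS.foldl
            (fun (s : Option Char × Int) r =>
              if ((cards.toList.count r : Int)) > s.2 then (some r, (cards.toList.count r : Int)) else s)
            ((none : Option Char), (0 : Int))) := by
        have hf : (fun (s : Option Char × Int) r =>
              if ((PySem.Str.count cards (String.ofList [r]) : Int)) > s.2
              then (some r, (PySem.Str.count cards (String.ofList [r]) : Int)) else s)
            = (fun (s : Option Char × Int) r =>
              if ((cards.toList.count r : Int)) > s.2 then (some r, (cards.toList.count r : Int)) else s) := by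
          funext s r
          exact hcnteq s r
        rw [hf]
      rw [hfoldeq]
      have hkey := hmcc_eq_best cards hpre.1 hpre.2
      rw [← hkey]
      -- A's char-by-char rebuild and B's str.replace are the same character map
      rw [PySem.List.foldl_append_singleton_eq_map]
      rw [PySem.Str.replace]
      have hJt : ("J" : String).toList = ['J'] := rfl
      have hWt : (String.ofList [highest_most_common_card cards true]).toList
          = [highest_most_common_card cards true] := by simp
      rw [hJt, hWt, chars_replace_single]
      apply congrArg String.ofList
      apply List.map_congr_left
      intro c _
      by_cases hc : c = 'J'
      · simp [hc]
      · simp [hc, beq_false_of_ne hc]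
  · have hin : PySem.Str.isIn "J" cards = false := by
      rw [Bool.eq_false_iff]
      intro hc
      exact hJ ((isIn_J_iff cards).1 hc)
    rw [hin]
    simp

-- ===== VERDICT (by name: the statement is the Claim_ definition above) =====
theorem transform_cards_with_joker_spec : Claim_equal_transform_cards_with_joker := by
  intro cards _ hpre
  unfold Spec_transform_cards_with_joker
  exact transform_eq cards hpre
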